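-- pv_equiv track=rewrite | github.com/MrBrantCode/unitest_baseline | mut_generate/mist_train_cf/cf_6637/solution.py | sum_arrays
-- ===== SOURCE A (Python) =====
-- def sum_arrays(arr1, arr2):
--     # Find the lengths of the two arrays
--     len1 = len(arr1)
--     len2 = len(arr2)
--
--     # Find the minimum length between the two arrays
--     min_len = min(len1, len2)
--
--     # Create an empty array to store the sums
--     new_array = []
--
--     # Iterate through the elements of the arrays up to the minimum length
--     for i in range(min_len):
--         # Find the sum of the corresponding elements and append it to the new array
--         new_element = arr1[i] + arr2[i]
--         new_array.append(min(new_element, 100))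
--
--     # Check if arr1 has remaining elements
--     if len1 > len2:
--         # Iterate through the remaining elements of arr1
--         for i in range(min_len, len1):
--             # Append the remaining elements to the new array
--             new_element = min(arr1[i], 100)
--
--             # Check if the sum of all elements in the new array exceeds 1000
--             if sum(new_array) + new_element > 1000:
--                 break
--
--             new_array.append(new_element)
--
--     # Check if arr2 has remaining elements
--     if len2 > len1:
--         # Iterate through the remaining elements of arr2
--         for i in range(min_len, len2):
--             # Append the remaining elements to the new array
--             new_element = min(arr2[i], 100)
--
--             # Check if the sum of all elements in the new array exceeds 1000
--             if sum(new_array) + new_element > 1000: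
--                 break
--
--             new_array.append(new_element)
--
--     return new_array
-- ===== SOURCE B (Python) =====
-- def sum_arrays(arr1, arr2):
--     min_len = min(len(arr1), len(arr2))
--     overlap = [min(a + b, 100) for a, b in zip(arr1, arr2)]
--     tail = arr1[min_len:] if len(arr1) > len(arr2) else arr2[min_len:]
--     capped = [min(x, 100) for x in tail]
--     run = sum(overlap)  # total of overlap, computed once; no 1000-cap applies there
--     keep = 0
--     for c in capped:
--         if run + c > 1000:
--             break
--         run += c
--         keep += 1
--     return overlap + capped[:keep]
-- ===== Notes on version B (the rewrite author's own statement) =====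
-- stated objective: alternative
-- what changed: B builds the capped overlap with a zip comprehension, takes the longer array's tail as one slice, and keeps tail elements with a single running prefix sum plus one final slice, instead of A's index loops that recompute sum(new_array) from scratch on every tail iteration.
import Mathlib
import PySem

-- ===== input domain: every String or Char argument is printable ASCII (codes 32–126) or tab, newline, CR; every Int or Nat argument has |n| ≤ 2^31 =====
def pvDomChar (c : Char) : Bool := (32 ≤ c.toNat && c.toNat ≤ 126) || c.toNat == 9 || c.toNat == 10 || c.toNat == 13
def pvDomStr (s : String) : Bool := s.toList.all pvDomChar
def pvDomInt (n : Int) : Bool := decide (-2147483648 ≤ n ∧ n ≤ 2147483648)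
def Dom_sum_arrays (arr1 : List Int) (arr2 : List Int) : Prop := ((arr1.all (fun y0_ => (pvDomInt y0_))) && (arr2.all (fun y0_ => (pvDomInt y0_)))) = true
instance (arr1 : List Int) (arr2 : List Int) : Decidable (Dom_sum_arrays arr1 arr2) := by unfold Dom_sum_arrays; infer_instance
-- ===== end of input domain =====

-- B replaces A's per-iteration sum(new_array) rescans by one running prefix sum (and its index loops by zip/slice), same return value.

-- ===== PORT A =====
-- step of A's tail loops (with a Bool 'stopped' flag modelling 'break')
def pvAStep (st : List Int × Bool) (v : Int) : List Int × Bool :=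
  if st.2 then st
  else
    let e := min v 100
    if st.1.sum + e > 1000 then (st.1, true) else (st.1 ++ [e], st.2)

def sum_arrays (arr1 : List Int) (arr2 : List Int) : List Int :=
  let len1 : Int := arr1.length
  let len2 : Int := arr2.length
  let min_len := min len1 len2
  let new_array := (PySem.List.pyRange 0 min_len 1).foldl
    (fun na i => na ++ [min (PySem.List.pyGetD arr1 i 0 + PySem.List.pyGetD arr2 i 0) 100]) []
  let new_array :=
    if len1 > len2 then
      ((PySem.List.pyRange min_len len1 1).foldl
        (fun st i => pvAStep st (PySem.List.pyGetD arr1 i 0)) (new_array, false)).1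
    else new_array
  let new_array :=
    if len2 > len1 then
      ((PySem.List.pyRange min_len len2 1).foldl
        (fun st i => pvAStep st (PySem.List.pyGetD arr2 i 0)) (new_array, false)).1
    else new_array
  new_array

-- ===== PORT B =====
-- number of leading tail elements kept while run + c ≤ 1000 (B's counting loop)
def pvBKeep (run : Int) (capped : List Int) : Nat :=
  match capped with
  | [] => 0
  | c :: cs => if run + c > 1000 then 0 else 1 + pvBKeep (run + c) cs

def sum_arrays_alt (arr1 : List Int) (arr2 : List Int) : List Int :=
  let min_len := min arr1.length arr2.length
  let overlap := (arr1.zip arr2).map (fun p => min (p.1 + p.2) 100)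
  let tail := if arr1.length > arr2.length then arr1.drop min_len else arr2.drop min_len
  let capped := tail.map (fun x => min x 100)
  overlap ++ capped.take (pvBKeep overlap.sum capped)

-- ===== PRECONDITION & SPEC =====
def Spec_sum_arrays (arr1 : List Int) (arr2 : List Int) (out : List Int) : Prop := out = sum_arrays_alt arr1 arr2
instance (arr1 : List Int) (arr2 : List Int) (out : List Int) : Decidable (Spec_sum_arrays arr1 arr2 out) := by unfold Spec_sum_arrays; infer_instance

-- ===== CLAIM (what is proved, stated in full; the proofs are below) =====
def Claim_equal_sum_arrays : Prop := ∀ (arr1 : List Int) (arr2 : List Int), Dom_sum_arrays arr1 arr2 → Spec_sum_arrays arr1 arr2 (sum_arrays arr1 arr2)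

-- ===== LEMMAS AND PROOFS =====

-- once the stop flag is set, A's fold does nothing
lemma pvAStep_stopped (xs : List Int) (acc : List Int) :
    xs.foldl pvAStep (acc, true) = (acc, true) := by
  induction xs with
  | nil => rfl
  | cons x xs ih => simpa [pvAStep] using ih

-- A's tail loop over a list equals acc ++ (the pvBKeep-prefix of the capped list)
lemma pvA_tail_eq (tail : List Int) (acc : List Int) :
    (tail.foldl pvAStep (acc, false)).1
      = acc ++ (tail.map (fun x => min x 100)).take
          (pvBKeep acc.sum (tail.map (fun x => min x 100))) := by
  induction tail generalizing acc with
  | nil => simp [pvBKeep]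
  | cons c cs ih =>
    by_cases h : acc.sum + min c 100 > 1000
    · simp [pvBKeep, pvAStep, h, pvAStep_stopped]
    · have hstep : pvAStep (acc, false) c = (acc ++ [min c 100], false) := by
        simp [pvAStep, h]
      have := ih (acc ++ [min c 100])
      simp only [List.foldl_cons, hstep, this, List.sum_append, List.sum_cons,
        List.sum_nil, add_zero]
      simp only [List.map_cons, pvBKeep, if_neg h]
      rw [Nat.add_comm, List.take_succ_cons, List.append_assoc]
      simp

-- the overlap fold equals the zip-map
lemma pvA_overlap_eq (xs ys : List Int) :
    (PySem.List.pyRange 0 (min (xs.length : Int) (ys.length : Int)) 1).foldl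
      (fun na i => na ++ [min (PySem.List.pyGetD xs i 0 + PySem.List.pyGetD ys i 0) 100]) []
      = (xs.zip ys).map (fun p => min (p.1 + p.2) 100) := by
  have hlen : min ((xs.length : Int)) ((ys.length : Int)) = ((xs.zip ys).length : Int) := by
    simp [List.length_zip]
  rw [PySem.List.foldl_append_singleton_eq_map
    (fun i => min (PySem.List.pyGetD xs i 0 + PySem.List.pyGetD ys i 0) 100), hlen]
  have hz := PySem.List.map_pyGetD_pyRange_zero (xs.zip ys) ((0 : Int), (0 : Int))
  simp only [PySem.List.len_eq] at hz
  conv_rhs => rw [← hz, List.map_map]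
  simp only [List.nil_append]
  refine List.map_congr_left ?_
  intro i hi
  have hib := PySem.List.mem_pyRange_one.mp hi
  have hx : i < (xs.length : Int) := by simp [List.length_zip] at hib; omega
  have hy : i < (ys.length : Int) := by simp [List.length_zip] at hib; omega
  have hzlen : i < ((xs.zip ys).length : Int) := by simpa using hib.2
  rw [Function.comp_apply, PySem.List.pyGetD_eq_getElem xs 0 hib.1 hx,
    PySem.List.pyGetD_eq_getElem ys 0 hib.1 hy,
    PySem.List.pyGetD_eq_getElem (xs.zip ys) _ hib.1 hzlen]
  simp [List.getElem_zip]

-- ===== VERDICT (by name: the statement is the Claim_ definition above) =====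
theorem sum_arrays_spec : Claim_equal_sum_arrays := by
  intro arr1 arr2 _
  unfold Spec_sum_arrays sum_arrays sum_arrays_alt
  simp only [pvA_overlap_eq]
  set ov := (arr1.zip arr2).map (fun p => min (p.1 + p.2) 100) with hov
  have hm0 : (0 : Int) ≤ min ((arr1.length : Int)) ((arr2.length : Int)) := by positivity
  have h1 := PySem.List.foldl_pyRange_pyGetD' arr1 0 pvAStep (ov, false) hm0
  have h2 := PySem.List.foldl_pyRange_pyGetD' arr2 0 pvAStep (ov, false) hm0
  rcases lt_trichotomy arr1.length arr2.length with hlt | heq | hgt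
  · -- arr2 longer: first if false, second true
    have hmin : (min ((arr1.length : Int)) ((arr2.length : Int))).toNat
        = min arr1.length arr2.length := by omega
    have hI1 : ¬ ((arr1.length : Int) > (arr2.length : Int)) := by exact_mod_cast not_lt.mpr hlt.le
    have hI2 : ((arr2.length : Int) > (arr1.length : Int)) := by exact_mod_cast hlt
    simp only [if_neg hI1, if_pos hI2, if_neg (not_lt.mpr hlt.le), h2, hmin,
      pvA_tail_eq]
  · -- equal lengths: both ifs false, B's tail empty
    have hI1 : ¬ ((arr1.length : Int) > (arr2.length : Int)) := by exact_mod_cast not_lt.mpr heq.le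
    have hI2 : ¬ ((arr2.length : Int) > (arr1.length : Int)) := by exact_mod_cast not_lt.mpr heq.ge
    simp only [if_neg hI1, if_neg hI2, if_neg (not_lt.mpr heq.le)]
    simp [heq, pvBKeep]
  · -- arr1 longer
    have hmin : (min ((arr1.length : Int)) ((arr2.length : Int))).toNat
        = min arr1.length arr2.length := by omega
    have hI1 : ((arr1.length : Int) > (arr2.length : Int)) := by exact_mod_cast hgt
    have hI2 : ¬ ((arr2.length : Int) > (arr1.length : Int)) := by exact_mod_cast not_lt.mpr hgt.le
    simp only [if_pos hI1, if_neg hI2, if_pos hgt, h1, hmin, pvA_tail_eq]
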